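-- pv_equiv track=rewrite | github.com/vOROn200/pyFIS | calibrator/backend/command_codec.py | build_full_payload
-- ===== SOURCE A (Python) =====
-- from typing import List
--
-- CHUNK_SIZE = 5
--
-- def build_full_payload(address: int, type_code: int, data_bytes: List[int]) -> List[int]:
--     """Rebuild a full payload from compact data bytes."""
--     if address is None or type_code is None:
--         return []
--     payload: List[int] = [address]
--     if not data_bytes:
--         payload.append(type_code)
--         payload.extend([0] * CHUNK_SIZE)
--         return payload
--     for i in range(0, len(data_bytes), CHUNK_SIZE):
--         chunk = data_bytes[i : i + CHUNK_SIZE]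
--         if len(chunk) < CHUNK_SIZE:
--             chunk = chunk + [0] * (CHUNK_SIZE - len(chunk))
--         payload.append(type_code)
--         payload.extend(chunk)
--     return payload
-- ===== SOURCE B (Python) =====
-- def build_full_payload(address, type_code, data_bytes):
--     """Rebuild a full payload from compact data bytes."""
--     if address is None or type_code is None:
--         return []
--
--     def chunks(rest):
--         if len(rest) <= 5:
--             return [type_code] + rest + [0] * (5 - len(rest))
--         return [type_code] + rest[:5] + chunks(rest[5:])
--
--     return [address] + chunks(data_bytes)
-- ===== Notes on version B (the rewrite author's own statement) =====
-- stated objective: simpler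
-- what changed: B replaces A's index loop over range(0,len,5) plus a separate empty-data branch with a single recursive helper that consumes the list five bytes at a time, padding only in its base case (which also covers empty data uniformly); it never mutates or specially cases the input.
import Mathlib
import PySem

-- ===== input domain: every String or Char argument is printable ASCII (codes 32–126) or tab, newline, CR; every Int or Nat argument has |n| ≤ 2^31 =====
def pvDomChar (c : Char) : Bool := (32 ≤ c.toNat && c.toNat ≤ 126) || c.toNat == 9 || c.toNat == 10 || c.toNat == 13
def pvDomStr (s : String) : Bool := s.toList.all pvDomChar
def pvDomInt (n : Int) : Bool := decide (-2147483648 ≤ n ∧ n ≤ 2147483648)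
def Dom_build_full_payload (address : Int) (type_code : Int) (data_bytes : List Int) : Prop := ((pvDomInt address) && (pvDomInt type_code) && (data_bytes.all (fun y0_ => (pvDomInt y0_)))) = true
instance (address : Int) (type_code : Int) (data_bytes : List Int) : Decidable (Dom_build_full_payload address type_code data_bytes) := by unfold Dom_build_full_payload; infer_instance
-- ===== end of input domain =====

-- B replaces A's index loop plus separate empty-data branch with one recursive helper that
-- consumes the list five bytes at a time, padding only in its base case (objective: simpler).

-- ===== PORT A =====
def build_full_payload (address : Int) (type_code : Int) (data_bytes : List Int) : List Int :=
  if data_bytes.isEmpty then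
    (([address] : List Int) ++ [type_code]) ++ List.replicate 5 0
  else
    (PySem.List.pyRange 0 (data_bytes.length : Int) 5).foldl
      (fun payload i =>
        (payload ++ [type_code]) ++
          (if (PySem.List.slice data_bytes (some i) (some (i + 5))).length < 5 then
            PySem.List.slice data_bytes (some i) (some (i + 5)) ++
              List.replicate (5 - (PySem.List.slice data_bytes (some i) (some (i + 5))).length) 0
          else PySem.List.slice data_bytes (some i) (some (i + 5))))
      [address]

-- ===== PORT B =====
/-- B's nested helper `chunks`: recursion over the list, five bytes at a time. -/
def altChunks (type_code : Int) (rest : List Int) : List Int :=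
  if rest.length ≤ 5 then
    [type_code] ++ rest ++ List.replicate (5 - rest.length) 0
  else
    [type_code] ++ PySem.List.slice rest none (some 5) ++
      altChunks type_code (PySem.List.slice rest (some 5) none)
termination_by rest.length
decreasing_by
  rw [PySem.List.slice_from rest (by norm_num)]
  simp only [List.length_drop]
  omega

def build_full_payload_alt (address : Int) (type_code : Int) (data_bytes : List Int) : List Int :=
  [address] ++ altChunks type_code data_bytes

-- ===== PRECONDITION & SPEC =====
def Spec_build_full_payload (address : Int) (type_code : Int) (data_bytes : List Int) (out : List Int) : Prop := out = build_full_payload_alt address type_code data_bytes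
instance (address : Int) (type_code : Int) (data_bytes : List Int) (out : List Int) : Decidable (Spec_build_full_payload address type_code data_bytes out) := by unfold Spec_build_full_payload; infer_instance

-- ===== CLAIM (what is proved, stated in full; the proofs are below) =====
def Claim_equal_build_full_payload : Prop := ∀ (address : Int) (type_code : Int) (data_bytes : List Int), Dom_build_full_payload address type_code data_bytes → Spec_build_full_payload address type_code data_bytes (build_full_payload address type_code data_bytes)

-- ===== LEMMAS AND PROOFS =====

/-- pad a list with zeros up to length 5 -/
def pad5 (l : List Int) : List Int := l ++ List.replicate (5 - l.length) 0

/-- A's chunking of nonempty data, as a recursive specification. -/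
def chunksA (tc : Int) (l : List Int) : List Int :=
  if l = [] then [] else [tc] ++ pad5 (l.take 5) ++ chunksA tc (l.drop 5)
termination_by l.length
decreasing_by
  simp only [List.length_drop]
  have : l.length ≠ 0 := by simpa [List.length_eq_zero_iff] using (by assumption : ¬ l = [])
  omega

theorem pyRange5_nil (a b : Int) (h : b ≤ a) : PySem.List.pyRange a b 5 = [] := by
  rw [PySem.List.pyRange_of_pos a b (by norm_num)]
  simp [show ¬ a < b by omega]

theorem pyRange5_cons (a b : Int) (h : a < b) :
    PySem.List.pyRange a b 5 = a :: PySem.List.pyRange (a + 5) b 5 := by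
  rw [PySem.List.pyRange_of_pos a b (by norm_num),
      PySem.List.pyRange_of_pos (a + 5) b (by norm_num)]
  have hc : (if a < b then ((b - a + 5 - 1) / 5).toNat else 0)
      = (if a + 5 < b then ((b - (a + 5) + 5 - 1) / 5).toNat else 0) + 1 := by
    split_ifs <;> omega
  rw [hc, List.range_succ_eq_map]
  simp only [List.map_cons, List.map_map]
  refine List.cons_eq_cons.mpr ⟨by push_cast; ring, ?_⟩
  apply List.map_congr_left
  intro k _
  simp only [Function.comp_apply, Nat.succ_eq_add_one]
  push_cast
  ring

/-- A's fold over range(0, len, 5) appends `chunksA` of the remaining suffix. -/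
theorem loopA (tc : Int) (data : List Int) :
    ∀ (n s : ℕ) (acc : List Int), data.length ≤ s + n →
    (PySem.List.pyRange (s : Int) (data.length : Int) 5).foldl
      (fun p i =>
        (p ++ [tc]) ++
          (if (PySem.List.slice data (some i) (some (i + 5))).length < 5 then
            PySem.List.slice data (some i) (some (i + 5)) ++
              List.replicate (5 - (PySem.List.slice data (some i) (some (i + 5))).length) 0
          else PySem.List.slice data (some i) (some (i + 5)))) acc
      = acc ++ chunksA tc (data.drop s) := by
  intro n
  induction n with
  | zero =>
    intro s acc h
    rw [pyRange5_nil _ _ (by exact_mod_cast (by omega : data.length ≤ s))]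
    rw [List.drop_eq_nil_iff.mpr (by omega)]
    simp [chunksA]
  | succ n ih =>
    intro s acc h
    by_cases hs : data.length ≤ s
    · rw [pyRange5_nil _ _ (by exact_mod_cast hs)]
      rw [List.drop_eq_nil_iff.mpr hs]
      simp [chunksA]
    · replace hs : s < data.length := by omega
      rw [pyRange5_cons _ _ (by exact_mod_cast hs), List.foldl_cons]
      have hslice : PySem.List.slice data (some (s : Int)) (some ((s : Int) + 5))
          = (data.drop s).take 5 := by
        have := PySem.List.slice_natCast_add data s 5
        simpa using this
      have hstep : (if (PySem.List.slice data (some (s : Int)) (some ((s : Int) + 5))).length < 5 then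
            PySem.List.slice data (some (s : Int)) (some ((s : Int) + 5)) ++
              List.replicate (5 - (PySem.List.slice data (some (s : Int)) (some ((s : Int) + 5))).length) 0
          else PySem.List.slice data (some (s : Int)) (some ((s : Int) + 5)))
          = pad5 ((data.drop s).take 5) := by
        rw [hslice]
        unfold pad5
        split_ifs with h5
        · rfl
        · have h5' : ((data.drop s).take 5).length = 5 := by
            have : ((data.drop s).take 5).length ≤ 5 := by simp
            omega
          simp [h5']
      rw [hstep]
      have hcast : ((s : Int) + 5) = ((s + 5 : ℕ) : Int) := by push_cast; ring
      rw [hcast, ih (s + 5) _ (by omega)]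
      have hne : data.drop s ≠ [] := by
        simp [List.drop_eq_nil_iff]; omega
      conv_rhs => rw [chunksA, if_neg hne]
      rw [List.take_drop, List.drop_drop]
      simp [List.append_assoc]

/-- B's recursive helper computes the same chunking as A does on nonempty data. -/
theorem altChunks_eq_chunksA (tc : Int) (l : List Int) (h : l ≠ []) :
    altChunks tc l = chunksA tc l := by
  rw [altChunks, chunksA, if_neg h]
  by_cases h5 : l.length ≤ 5
  · rw [if_pos h5]
    rw [List.take_of_length_le h5, List.drop_eq_nil_iff.mpr h5, chunksA, if_pos rfl]
    simp [pad5]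
  · rw [if_neg h5]
    rw [PySem.List.slice_to l (by norm_num), PySem.List.slice_from l (by norm_num)]
    have hpad : pad5 (l.take 5) = l.take 5 := by
      have : (l.take 5).length = 5 := by simp; omega
      simp [pad5, this]
    rw [hpad]
    have hne : l.drop 5 ≠ [] := by simp [List.drop_eq_nil_iff]; omega
    rw [altChunks_eq_chunksA tc (l.drop (5 : Int).toNat) (by simpa using hne)]
    simp
termination_by l.length
decreasing_by simp; omega


-- ===== VERDICT (by name: the statement is the Claim_ definition above) =====
theorem build_full_payload_spec : Claim_equal_build_full_payload := by
  intro address type_code data_bytes _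
  unfold Spec_build_full_payload
  by_cases hd : data_bytes = []
  · subst hd
    unfold build_full_payload build_full_payload_alt
    rw [altChunks]
    norm_num
  · unfold build_full_payload build_full_payload_alt
    rw [List.isEmpty_eq_false_iff.mpr hd]
    have hA := loopA type_code data_bytes data_bytes.length 0 [address] (by omega)
    simp only [Nat.cast_zero, List.drop_zero] at hA
    rw [if_neg (by simp), hA, altChunks_eq_chunksA type_code data_bytes hd]
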